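-- pv_equiv track=rewrite | github.com/HimanshuBisht001/ProspectSearchAgent | src/api_clients/smart_enricher.py | _infer_tech_stack
-- ===== SOURCE A (Python) =====
-- from typing import List, Dict, Any
--
-- def _infer_tech_stack(job_title: str) -> List[str]:
--     """Infer tech stack from job title"""
--     tech_stack = []
--     job_lower = job_title.lower()
--
--     # Programming languages
--     if any(lang in job_lower for lang in ["python", "py"]):
--         tech_stack.append("Python")
--     if any(lang in job_lower for lang in ["java"]):
--         tech_stack.append("Java")
--     if any(lang in job_lower for lang in ["javascript", "js", "node"]):
--         tech_stack.append("JavaScript")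
--     if any(lang in job_lower for lang in ["sql"]):
--         tech_stack.append("SQL")
--     if any(lang in job_lower for lang in ["r"]):
--         tech_stack.append("R")
--
--     # Technologies
--     if any(tech in job_lower for tech in ["aws", "amazon web services"]):
--         tech_stack.append("AWS")
--     if any(tech in job_lower for tech in ["azure"]):
--         tech_stack.append("Azure")
--     if any(tech in job_lower for tech in ["gcp", "google cloud"]):
--         tech_stack.append("GCP")
--     if any(tech in job_lower for tech in ["snowflake"]):
--         tech_stack.append("Snowflake")
--     if any(tech in job_lower for tech in ["databricks"]):
--         tech_stack.append("Databricks")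
--     if any(tech in job_lower for tech in ["spark"]):
--         tech_stack.append("Apache Spark")
--     if any(tech in job_lower for tech in ["docker", "kubernetes", "k8s"]):
--         tech_stack.append("Containers")
--
--     return tech_stack[:5]  # Limit to top 5 technologies
-- ===== SOURCE B (Python) =====
-- # B: recursive descent over a keyword table with an early stop once 5 labels
-- # are collected (no intermediate full list, no final slice).
-- _TECH_TABLE = [
--     (("python", "py"), "Python"),
--     (("java",), "Java"),
--     (("javascript", "js", "node"), "JavaScript"),
--     (("sql",), "SQL"),
--     (("r",), "R"),
--     (("aws", "amazon web services"), "AWS"),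
--     (("azure",), "Azure"),
--     (("gcp", "google cloud"), "GCP"),
--     (("snowflake",), "Snowflake"),
--     (("databricks",), "Databricks"),
--     (("spark",), "Apache Spark"),
--     (("docker", "kubernetes", "k8s"), "Containers"),
-- ]
--
-- def _infer_tech_stack(job_title: str):
--     job_lower = job_title.lower()
--
--     def pick(i, remaining):
--         if remaining == 0 or i == len(_TECH_TABLE):
--             return []
--         kws, label = _TECH_TABLE[i]
--         if any(kw in job_lower for kw in kws):
--             return [label] + pick(i + 1, remaining - 1)
--         return pick(i + 1, remaining)
--
--     return pick(0, 5)
-- ===== Notes on version B (the rewrite author's own statement) =====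
-- stated objective: alternative
-- what changed: Replaces the twelve sequential if/append statements plus a final [:5] slice with a recursive descent over a (keywords,label) table that counts matches down from 5 and stops early, never building the full list.
import Mathlib
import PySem

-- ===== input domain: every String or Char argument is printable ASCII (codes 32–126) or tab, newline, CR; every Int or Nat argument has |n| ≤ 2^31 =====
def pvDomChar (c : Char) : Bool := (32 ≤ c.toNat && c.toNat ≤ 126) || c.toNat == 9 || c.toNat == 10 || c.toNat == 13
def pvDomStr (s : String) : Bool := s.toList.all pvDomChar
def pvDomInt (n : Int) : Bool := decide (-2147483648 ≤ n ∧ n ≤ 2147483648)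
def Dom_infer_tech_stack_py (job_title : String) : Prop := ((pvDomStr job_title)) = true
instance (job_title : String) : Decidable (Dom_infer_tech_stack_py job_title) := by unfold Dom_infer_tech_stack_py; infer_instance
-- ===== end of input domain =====

-- B replaces A's twelve if/append statements + final [:5] slice by a recursive descent
-- over a keyword table that counts down from 5 and stops early (alternative; same cost).

-- ===== PORT A =====
-- literal transliteration: job_lower once, twelve if/append statements, then tech_stack[:5]
def infer_tech_stack_py (job_title : String) : List String :=
  let tech_stack : List String := []
  let job_lower := PySem.Str.lower job_title
  let tech_stack := if ["python", "py"].any (fun lang => PySem.Str.isIn lang job_lower) then tech_stack ++ ["Python"] else tech_stack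
  let tech_stack := if ["java"].any (fun lang => PySem.Str.isIn lang job_lower) then tech_stack ++ ["Java"] else tech_stack
  let tech_stack := if ["javascript", "js", "node"].any (fun lang => PySem.Str.isIn lang job_lower) then tech_stack ++ ["JavaScript"] else tech_stack
  let tech_stack := if ["sql"].any (fun lang => PySem.Str.isIn lang job_lower) then tech_stack ++ ["SQL"] else tech_stack
  let tech_stack := if ["r"].any (fun lang => PySem.Str.isIn lang job_lower) then tech_stack ++ ["R"] else tech_stack
  let tech_stack := if ["aws", "amazon web services"].any (fun tech => PySem.Str.isIn tech job_lower) then tech_stack ++ ["AWS"] else tech_stack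
  let tech_stack := if ["azure"].any (fun tech => PySem.Str.isIn tech job_lower) then tech_stack ++ ["Azure"] else tech_stack
  let tech_stack := if ["gcp", "google cloud"].any (fun tech => PySem.Str.isIn tech job_lower) then tech_stack ++ ["GCP"] else tech_stack
  let tech_stack := if ["snowflake"].any (fun tech => PySem.Str.isIn tech job_lower) then tech_stack ++ ["Snowflake"] else tech_stack
  let tech_stack := if ["databricks"].any (fun tech => PySem.Str.isIn tech job_lower) then tech_stack ++ ["Databricks"] else tech_stack
  let tech_stack := if ["spark"].any (fun tech => PySem.Str.isIn tech job_lower) then tech_stack ++ ["Apache Spark"] else tech_stack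
  let tech_stack := if ["docker", "kubernetes", "k8s"].any (fun tech => PySem.Str.isIn tech job_lower) then tech_stack ++ ["Containers"] else tech_stack
  PySem.List.slice tech_stack none (some 5)

-- ===== PORT B =====
def pvTechTable : List (List String × String) :=
  [ (["python", "py"], "Python"),
    (["java"], "Java"),
    (["javascript", "js", "node"], "JavaScript"),
    (["sql"], "SQL"),
    (["r"], "R"),
    (["aws", "amazon web services"], "AWS"),
    (["azure"], "Azure"),
    (["gcp", "google cloud"], "GCP"),
    (["snowflake"], "Snowflake"),
    (["databricks"], "Databricks"),
    (["spark"], "Apache Spark"),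
    (["docker", "kubernetes", "k8s"], "Containers") ]

-- recursive descent: stop when `remaining = 0` or the table is exhausted
def pvPickTech (job_lower : String) : List (List String × String) → Nat → List String
  | _, 0 => []
  | [], _ + 1 => []
  | (kws, label) :: rest, n + 1 =>
      if kws.any (fun kw => PySem.Str.isIn kw job_lower) then
        label :: pvPickTech job_lower rest n
      else
        pvPickTech job_lower rest (n + 1)

def infer_tech_stack_py_alt (job_title : String) : List String :=
  pvPickTech (PySem.Str.lower job_title) pvTechTable 5

-- ===== PRECONDITION & SPEC =====
def Spec_infer_tech_stack_py (job_title : String) (out : List String) : Prop := out = infer_tech_stack_py_alt job_title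
instance (job_title : String) (out : List String) : Decidable (Spec_infer_tech_stack_py job_title out) := by unfold Spec_infer_tech_stack_py; infer_instance

-- ===== CLAIM =====
def Claim_equal_infer_tech_stack_py : Prop := ∀ (job_title : String), Dom_infer_tech_stack_py job_title → Spec_infer_tech_stack_py job_title (infer_tech_stack_py job_title)

-- ===== LEMMAS AND PROOFS =====
-- B's recursive early-stopping pick computes take-n of the filtered labels
theorem pvPickTech_eq (jl : String) (t : List (List String × String)) (n : Nat) :
    pvPickTech jl t n =
      ((t.filter (fun p => p.1.any (fun kw => PySem.Str.isIn kw jl))).map Prod.snd).take n := by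
  induction t generalizing n with
  | nil => cases n <;> simp [pvPickTech]
  | cons hd tl ih =>
    cases n with
    | zero => simp [pvPickTech]
    | succ m =>
      obtain ⟨kws, label⟩ := hd
      by_cases h : (kws.any (fun kw => PySem.Str.isIn kw jl)) = true
      · simp only [pvPickTech, ih m, List.filter_cons, h, if_true,
          List.map_cons, List.take_succ_cons]
      · simp only [pvPickTech, ih (m + 1), List.filter_cons, h,
          Bool.false_eq_true, if_false]

-- ===== VERDICT =====
theorem infer_tech_stack_py_spec : Claim_equal_infer_tech_stack_py := by
  intro job_title _
  -- A's twelve if/append statements are definitionally a left fold of the table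
  have hA : infer_tech_stack_py job_title =
      PySem.List.slice
        (pvTechTable.foldl
          (fun acc x =>
            if x.1.any (fun kw => PySem.Str.isIn kw (PySem.Str.lower job_title)) then
              acc ++ [x.2]
            else acc) [])
        none (some 5) := rfl
  unfold Spec_infer_tech_stack_py infer_tech_stack_py_alt
  rw [hA, PySem.List.foldl_append_if, List.nil_append,
      show ((5 : Int)) = ((5 : Nat) : Int) from rfl, PySem.List.slice_to_natCast,
      pvPickTech_eq]
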